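-- pv_equiv track=rewrite | github.com/retwep/aoc2023 | 13/mirror.py | find_all_mirrors
-- ===== SOURCE A (Python) =====
-- from typing import List, Union
--
-- def is_mirror(line:str, i:int) -> bool:
--     x = 1
--     if i+1 >= len(line):
--         return False
--     while i-x+1 >= 0 and i+x < len(line):
--         if line[i-x+1] != line[i+x]:
--             return False
--         x += 1
--     return True
--
-- def find_all_mirrors(line:str) -> Union[List[int],None]:
--     mirrors:List[int] = list()
--     for i in range(0,len(line)):
--         # assume the mirror line here and check for reflection
--         m = is_mirror(line, i)
--         if m:
--             mirrors.append(i)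
--     if not mirrors:
--         return None
--     return mirrors
-- ===== SOURCE B (Python) =====
-- def find_all_mirrors(line):
--     n = len(line)
--
--     def reflects(i):
--         # shorter side fully reflects onto the longer side
--         k = min(i + 1, n - 1 - i)
--         return line[i + 1 - k:i + 1][::-1] == line[i + 1:i + 1 + k]
--
--     mirrors = [i for i in range(n - 1) if reflects(i)]
--     return mirrors or None
-- ===== Notes on version B (the rewrite author's own statement) =====
-- stated objective: simpler
-- what changed: Replaces the hand-written expanding while-loop character comparison per center with a direct slice test: the shorter side of each candidate mirror, reversed, must equal the facing slice of the longer side; candidates collected by a comprehension over range(n-1).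
import Mathlib
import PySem

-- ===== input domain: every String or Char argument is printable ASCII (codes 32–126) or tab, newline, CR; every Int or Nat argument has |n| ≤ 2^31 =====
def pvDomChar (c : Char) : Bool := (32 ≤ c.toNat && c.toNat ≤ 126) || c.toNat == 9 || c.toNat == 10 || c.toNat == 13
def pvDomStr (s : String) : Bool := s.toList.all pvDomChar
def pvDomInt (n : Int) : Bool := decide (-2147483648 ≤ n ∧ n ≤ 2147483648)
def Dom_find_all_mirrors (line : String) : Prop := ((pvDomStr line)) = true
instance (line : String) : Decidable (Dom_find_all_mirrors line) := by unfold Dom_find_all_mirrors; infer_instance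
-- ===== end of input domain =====

-- B replaces A's per-center expanding while-loop with a reversed-slice comparison of the
-- shorter side against the longer side (simpler decomposition, same return value).


-- ===== PORT A =====
-- the 'while i-x+1 >= 0 and i+x < len(line)' loop of is_mirror; fuel only makes the
-- recursion total (fuel = len+1 is never exhausted since i+x < len forces x ≤ len)
def isMirrorLoop (l : List Char) (i : Int) : Nat → Int → Bool
  | 0, _ => true
  | f + 1, x =>
    if i - x + 1 ≥ 0 ∧ i + x < (l.length : Int) then
      if PySem.List.pyGet? l (i - x + 1) ≠ PySem.List.pyGet? l (i + x) then false
      else isMirrorLoop l i f (x + 1)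
    else true

def is_mirror (l : List Char) (i : Int) : Bool :=
  if i + 1 ≥ (l.length : Int) then false
  else isMirrorLoop l i (l.length + 1) 1

def find_all_mirrors (line : String) : Option (List Int) :=
  let l := line.toList
  let mirrors := (PySem.List.pyRange 0 (l.length : Int) 1).foldl
    (fun acc i => if is_mirror l i then acc ++ [i] else acc) []
  if mirrors = [] then none else some mirrors

-- ===== PORT B =====
def reflects (l : List Char) (n : Int) (i : Int) : Bool :=
  let k := min (i + 1) (n - 1 - i)
  (PySem.List.slice l (some (i + 1 - k)) (some (i + 1))).reverse
    = PySem.List.slice l (some (i + 1)) (some (i + 1 + k))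

def find_all_mirrors_alt (line : String) : Option (List Int) :=
  let l := line.toList
  let n : Int := l.length
  let mirrors := (PySem.List.pyRange 0 (n - 1) 1).filter (reflects l n)
  if mirrors = [] then none else some mirrors

-- ===== PRECONDITION & SPEC =====
def Spec_find_all_mirrors (line : String) (out : Option (List Int)) : Prop := out = find_all_mirrors_alt line
instance (line : String) (out : Option (List Int)) : Decidable (Spec_find_all_mirrors line out) := by unfold Spec_find_all_mirrors; infer_instance

-- ===== CLAIM (what is proved, stated in full; the proofs are below) =====
def Claim_equal_find_all_mirrors : Prop := ∀ (line : String), Dom_find_all_mirrors line → Spec_find_all_mirrors line (find_all_mirrors line)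

-- ===== LEMMAS AND PROOFS =====

-- A's while loop, given enough fuel, checks every offset y with x ≤ y ≤ min(i+1, n-1-i)
theorem loop_eq (l : List Char) (i : Int) :
    ∀ (f : Nat) (x : Int), 1 ≤ x → (l.length : Int) - i - x < (f : Int) →
      isMirrorLoop l i f x =
        (PySem.List.pyRange x (min (i + 1) ((l.length : Int) - 1 - i) + 1) 1).all
          (fun y => PySem.List.pyGet? l (i - y + 1) == PySem.List.pyGet? l (i + y)) := by
  intro f
  induction f with
  | zero =>
    intro x hx hf
    rw [PySem.List.pyRange_one_eq_nil (by omega)]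
    simp [isMirrorLoop]
  | succ f ih =>
    intro x hx hf
    by_cases hg : i - x + 1 ≥ 0 ∧ i + x < (l.length : Int)
    · rw [PySem.List.pyRange_one_cons (by omega)]
      rw [isMirrorLoop, if_pos hg, List.all_cons]
      by_cases he : PySem.List.pyGet? l (i - x + 1) = PySem.List.pyGet? l (i + x)
      · rw [if_neg (by simpa using he), ih (x + 1) (by omega) (by omega)]
        simp [he]
      · rw [if_pos he]
        simp [he]
    · rw [isMirrorLoop, if_neg hg, PySem.List.pyRange_one_eq_nil (by omega), List.all_nil]

-- the reversed-slice comparison, in drop/take form, says exactly "each pair around the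
-- center agrees", position by position
theorem rev_take_eq_iff (l : List Char) (m kN : Nat)
    (hm : kN ≤ m + 1) (hL : m + 1 + kN ≤ l.length) :
    ((List.take kN (List.drop (m + 1 - kN) l)).reverse = List.take kN (List.drop (m + 1) l)) ↔
      (∀ t, t < kN → l[m - t]? = l[m + 1 + t]?) := by
  have hlenA : (List.take kN (List.drop (m + 1 - kN) l)).length = kN := by
    simp [List.length_take, List.length_drop]; omega
  have hA : ∀ j, j < kN → (List.take kN (List.drop (m + 1 - kN) l)).reverse[j]? = l[m - j]? := by
    intro j hj
    rw [List.getElem?_reverse (by omega), hlenA, List.getElem?_take, if_pos (by omega),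
      List.getElem?_drop]
    congr 1
    omega
  have hB : ∀ j, j < kN → (List.take kN (List.drop (m + 1) l))[j]? = l[m + 1 + j]? := by
    intro j hj
    rw [List.getElem?_take, if_pos hj, List.getElem?_drop]
  constructor
  · intro he t ht
    rw [← hA t ht, ← hB t ht, he]
  · intro hP
    apply List.ext_getElem?
    intro j
    by_cases hj : j < kN
    · rw [hA j hj, hB j hj]
      exact hP j hj
    · rw [List.getElem?_eq_none (by simp [hlenA]; omega),
        List.getElem?_eq_none (by simp [List.length_take, List.length_drop]; omega)]

-- the two per-center tests agree on every in-range center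
theorem pointwise (l : List Char) (m : Nat) (hin : m + 1 < l.length) :
    is_mirror l (m : Int) = reflects l (l.length : Int) (m : Int) := by
  set kN : Nat := min (m + 1) (l.length - 1 - m) with hkN
  have hm : kN ≤ m + 1 := by omega
  have hL : m + 1 + kN ≤ l.length := by omega
  have hmin : min ((m : Int) + 1) ((l.length : Int) - 1 - (m : Int)) = (kN : Int) := by omega
  -- A's side
  rw [is_mirror, if_neg (by omega), loop_eq l m (l.length + 1) 1 le_rfl (by push_cast; omega),
    hmin, PySem.List.pyRange_one]
  -- B's side
  simp only [reflects, hmin]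
  rw [PySem.List.slice_of_nonneg l (by omega) (by omega) (by omega) (by omega),
    PySem.List.slice_of_nonneg l (by omega) (by omega) (by omega) (by omega)]
  rw [show ((m : Int) + 1).toNat - ((m : Int) + 1 - (kN : Int)).toNat = kN from by omega,
    show ((m : Int) + 1 - (kN : Int)).toNat = m + 1 - kN from by omega,
    show ((m : Int) + 1 + (kN : Int)).toNat - ((m : Int) + 1).toNat = kN from by omega,
    show ((m : Int) + 1).toNat = m + 1 from by omega]
  rw [Bool.eq_iff_iff, List.all_eq_true, decide_eq_true_iff, rev_take_eq_iff l m kN hm hL]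
  constructor
  · intro h t ht
    have := h ((1 : Int) + (t : Int)) (by
      simp only [List.mem_map, List.mem_range]
      exact ⟨t, by omega, rfl⟩)
    simp only [beq_iff_eq] at this
    rw [show (m : Int) - (1 + (t : Int)) + 1 = ((m - t : Nat) : Int) from by omega,
      show (m : Int) + (1 + (t : Int)) = ((m + 1 + t : Nat) : Int) from by omega,
      PySem.List.pyGet?_natCast, PySem.List.pyGet?_natCast] at this
    exact this
  · intro h y hy
    simp only [List.mem_map, List.mem_range] at hy
    obtain ⟨t, ht, rfl⟩ := hy
    have ht' : t < kN := by omega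
    have := h t ht'
    simp only [beq_iff_eq]
    rw [show (m : Int) - (1 + (t : Int)) + 1 = ((m - t : Nat) : Int) from by omega,
      show (m : Int) + (1 + (t : Int)) = ((m + 1 + t : Nat) : Int) from by omega,
      PySem.List.pyGet?_natCast, PySem.List.pyGet?_natCast]
    exact this

-- A's collected list equals B's collected list
theorem lists_eq (l : List Char) :
    (PySem.List.pyRange 0 (l.length : Int) 1).foldl
        (fun acc i => if is_mirror l i then acc ++ [i] else acc) [] =
      (PySem.List.pyRange 0 ((l.length : Int) - 1) 1).filter (reflects l (l.length : Int)) := by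
  rw [show (fun (acc : List Int) (i : Int) => if is_mirror l i then acc ++ [i] else acc) =
      (fun acc i => if is_mirror l i then acc ++ [(fun x => x) i] else acc) from rfl,
    PySem.List.foldl_append_if, List.map_id_fun', id]
  rcases Nat.eq_zero_or_pos l.length with h0 | hpos
  · rw [h0]
    norm_num [PySem.List.pyRange_one_eq_nil]
  · rw [PySem.List.pyRange_one_append 0 ((l.length : Int) - 1) (l.length : Int) (by omega) (by omega),
      List.filter_append,
      show PySem.List.pyRange ((l.length : Int) - 1) (l.length : Int) 1 = [(l.length : Int) - 1] from by
        rw [PySem.List.pyRange_one_cons (by omega), PySem.List.pyRange_one_eq_nil (by omega)]]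
    rw [show List.filter (is_mirror l) [(l.length : Int) - 1] = [] from by
        simp only [List.filter, is_mirror, if_pos (show (l.length : Int) - 1 + 1 ≥ (l.length : Int) from by omega)],
      List.append_nil]
    apply List.filter_congr
    intro i hi
    rw [PySem.List.mem_pyRange_one] at hi
    obtain ⟨m, rfl⟩ := Int.eq_ofNat_of_zero_le hi.1
    exact pointwise l m (by omega)

-- ===== VERDICT (by name: the statement is the Claim_ definition above) =====
theorem find_all_mirrors_spec : Claim_equal_find_all_mirrors := by
  intro line _
  unfold Spec_find_all_mirrors find_all_mirrors find_all_mirrors_alt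
  simp only [lists_eq line.toList]
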